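-- pv_equiv track=rewrite | github.com/cgates/bamnostic | bamnostic/bamnostic/bai.py | reg2bin
-- ===== SOURCE A (Python) =====
-- def reg2bin(beg: int, end: int) -> int:
--     '''Finds the largest superset bin of region. Numeric values taken from hts-specs
--
--     Args:
--         beg (int): inclusive beginning position of region
--         end (int): exclusive end position of region
--
--     Returns:
--         (int): distinct bin ID for largest superset bin of region
--     '''
--     left_shift = 15
--     for i in range(14, 27, 3):
--         if beg >> i == (end-1) >> i:
--             return int(((1<<left_shift)-1)/7 + (beg >> i))
--         left_shift -= 3
--     else:
--         return 0
-- ===== SOURCE B (Python) =====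
-- def reg2bin(beg: int, end: int) -> int:
--     '''Finds the largest superset bin of region by descending the binning tree.
--
--     Walks the UCSC/hts binning tree from the root: starting at the coarsest
--     level (shift 26), it keeps descending into the child bin containing the
--     whole region (children of bin b are 8*b+1 .. 8*b+8) for as long as beg
--     and end-1 still fall into the same child, and returns the deepest such bin.
--     '''
--     e = end - 1
--     if beg >> 26 != e >> 26:
--         return 0
--     b = 1 + (beg >> 26)
--     shift = 23
--     while shift >= 14 and (beg >> shift) == (e >> shift):
--         b = 8 * b + 1 + (beg >> shift) - 8 * (beg >> (shift + 3))
--         shift -= 3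
--     return b
-- ===== Notes on version B (the rewrite author's own statement) =====
-- stated objective: alternative
-- what changed: Replaces A's bottom-up scan over the five shift levels with a per-level offset formula int(((1<<ls)-1)/7) by a top-down descent of the binning tree: start at the root child 1+(beg>>26) and repeatedly step into the child bin via the tree recurrence 8*b+1+childIndex while beg and end-1 still agree at the next finer shift.
import Mathlib
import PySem

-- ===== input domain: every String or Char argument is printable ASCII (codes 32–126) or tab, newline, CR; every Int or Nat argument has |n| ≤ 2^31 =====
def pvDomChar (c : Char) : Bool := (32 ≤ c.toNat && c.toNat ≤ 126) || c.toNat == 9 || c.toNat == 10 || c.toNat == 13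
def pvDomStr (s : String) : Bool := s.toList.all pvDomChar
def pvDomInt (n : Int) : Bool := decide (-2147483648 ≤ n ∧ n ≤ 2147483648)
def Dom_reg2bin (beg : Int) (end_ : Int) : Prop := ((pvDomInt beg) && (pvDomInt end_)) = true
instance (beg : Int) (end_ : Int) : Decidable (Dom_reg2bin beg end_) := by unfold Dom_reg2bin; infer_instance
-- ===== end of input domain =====

-- B replaces A's bottom-up offset-formula scan by a top-down descent of the binning
-- tree using the child recurrence 8*b+1+childIndex; objective: alternative.

-- ===== PORT A =====
-- the loop 'for i in range(14, 27, 3)' with the shrinking left_shift; 'int(((1<<ls)-1)/7)'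
-- is exact integer arithmetic here since (2^ls - 1) is divisible by 7 for ls ∈ {15,12,9,6,3}
-- and the quotient is far below 2^53, so the float division is ported as floor division.
def reg2binGo (beg : Int) (e : Int) : List Int → Int → Int
  | [], _ => 0
  | i :: rest, left_shift =>
    if beg >>> i.toNat = e >>> i.toNat then
      PySem.Int.floordiv ((1 <<< left_shift.toNat) - 1) 7 + (beg >>> i.toNat)
    else reg2binGo beg e rest (left_shift - 3)

def reg2bin (beg : Int) (end_ : Int) : Int :=
  reg2binGo beg (end_ - 1) (PySem.List.pyRange 14 27 3) 15

-- ===== PORT B =====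
-- Source B's while loop: descend while beg and e share the child at the current shift.
def reg2binAltGo (beg e : Int) (b : Int) (shift : Nat) : Int :=
  if h : 14 ≤ shift ∧ beg >>> shift = e >>> shift then
    reg2binAltGo beg e (8 * b + 1 + (beg >>> shift) - 8 * (beg >>> (shift + 3))) (shift - 3)
  else b
termination_by shift
decreasing_by omega

def reg2bin_alt (beg : Int) (end_ : Int) : Int :=
  let e := end_ - 1
  if beg >>> (26 : Nat) ≠ e >>> (26 : Nat) then 0
  else reg2binAltGo beg e (1 + (beg >>> (26 : Nat))) 23

-- ===== PRECONDITION & SPEC =====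
def Spec_reg2bin (beg : Int) (end_ : Int) (out : Int) : Prop := out = reg2bin_alt beg end_
instance (beg : Int) (end_ : Int) (out : Int) : Decidable (Spec_reg2bin beg end_ out) := by unfold Spec_reg2bin; infer_instance

-- ===== CLAIM (what is proved, stated in full; the proofs are below) =====
def Claim_equal_reg2bin : Prop := ∀ (beg : Int) (end_ : Int), Dom_reg2bin beg end_ → Spec_reg2bin beg end_ (reg2bin beg end_)

-- ===== LEMMAS AND PROOFS =====

-- composition of arithmetic right shifts on Int
lemma int_shiftRight_add (a : Int) (i k : Nat) : a >>> (i + k) = (a >>> i) >>> k := by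
  rcases a with m | m
  · show Int.ofNat (m >>> (i + k)) = Int.ofNat ((m >>> i) >>> k)
    rw [Nat.shiftRight_add]
  · show Int.negSucc (m >>> (i + k)) = Int.negSucc ((m >>> i) >>> k)
    rw [Nat.shiftRight_add]

-- agreement at a fine shift implies agreement at every coarser shift
lemma shift_mono (a b : Int) (i k : Nat) (h : a >>> i = b >>> i) :
    a >>> (i + k) = b >>> (i + k) := by
  rw [int_shiftRight_add, int_shiftRight_add, h]

lemma pyRange_14_27_3 : PySem.List.pyRange 14 27 3 = [14, 17, 20, 23, 26] := by decide

-- ===== VERDICT (by name: the statement is the Claim_ definition above) =====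
theorem reg2bin_spec : Claim_equal_reg2bin := by
  intro beg end_ _
  show reg2bin beg end_ = reg2bin_alt beg end_
  unfold reg2bin reg2bin_alt
  rw [pyRange_14_27_3]
  simp only [reg2binGo]
  rw [show ((14:Int).toNat) = 14 from rfl, show ((17:Int).toNat) = 17 from rfl,
      show ((20:Int).toNat) = 20 from rfl, show ((23:Int).toNat) = 23 from rfl,
      show ((26:Int).toNat) = 26 from rfl]
  set e := end_ - 1 with he
  by_cases h26 : beg >>> (26:Nat) = e >>> (26:Nat)
  · by_cases h23 : beg >>> (23:Nat) = e >>> (23:Nat)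
    · by_cases h20 : beg >>> (20:Nat) = e >>> (20:Nat)
      · by_cases h17 : beg >>> (17:Nat) = e >>> (17:Nat)
        · by_cases h14 : beg >>> (14:Nat) = e >>> (14:Nat)
          · rw [if_pos h14, if_neg (not_not_intro h26),
                reg2binAltGo, dif_pos ⟨by norm_num, h23⟩,
                reg2binAltGo, dif_pos ⟨by norm_num, h20⟩,
                reg2binAltGo, dif_pos ⟨by norm_num, h17⟩,
                reg2binAltGo, dif_pos ⟨by norm_num, h14⟩,
                reg2binAltGo, dif_neg (by omega)]
            rw [show PySem.Int.floordiv ((1 <<< (15:Int).toNat) - 1) 7 = 4681 from by decide]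
            norm_num; ring
          · rw [if_neg h14, if_pos h17, if_neg (not_not_intro h26),
                reg2binAltGo, dif_pos ⟨by norm_num, h23⟩,
                reg2binAltGo, dif_pos ⟨by norm_num, h20⟩,
                reg2binAltGo, dif_pos ⟨by norm_num, h17⟩,
                reg2binAltGo, dif_neg (by intro hc; exact h14 hc.2)]
            rw [show PySem.Int.floordiv ((1 <<< ((15:Int)-3).toNat) - 1) 7 = 585 from by decide]
            norm_num; ring
        · have h14 : ¬ beg >>> (14:Nat) = e >>> (14:Nat) := fun hc => h17 (shift_mono beg e 14 3 hc)
          rw [if_neg h14, if_neg h17, if_pos h20, if_neg (not_not_intro h26),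
              reg2binAltGo, dif_pos ⟨by norm_num, h23⟩,
              reg2binAltGo, dif_pos ⟨by norm_num, h20⟩,
              reg2binAltGo, dif_neg (by intro hc; exact h17 hc.2)]
          rw [show PySem.Int.floordiv ((1 <<< ((15:Int)-3-3).toNat) - 1) 7 = 73 from by decide]
          norm_num; ring
      · have h17 : ¬ beg >>> (17:Nat) = e >>> (17:Nat) := fun hc => h20 (shift_mono beg e 17 3 hc)
        have h14 : ¬ beg >>> (14:Nat) = e >>> (14:Nat) := fun hc => h17 (shift_mono beg e 14 3 hc)
        rw [if_neg h14, if_neg h17, if_neg h20, if_pos h23, if_neg (not_not_intro h26),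
            reg2binAltGo, dif_pos ⟨by norm_num, h23⟩,
            reg2binAltGo, dif_neg (by intro hc; exact h20 hc.2)]
        rw [show PySem.Int.floordiv ((1 <<< ((15:Int)-3-3-3).toNat) - 1) 7 = 9 from by decide]
        norm_num; ring
    · have h20 : ¬ beg >>> (20:Nat) = e >>> (20:Nat) := fun hc => h23 (shift_mono beg e 20 3 hc)
      have h17 : ¬ beg >>> (17:Nat) = e >>> (17:Nat) := fun hc => h20 (shift_mono beg e 17 3 hc)
      have h14 : ¬ beg >>> (14:Nat) = e >>> (14:Nat) := fun hc => h17 (shift_mono beg e 14 3 hc)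
      rw [if_neg h14, if_neg h17, if_neg h20, if_neg h23, if_pos h26, if_neg (not_not_intro h26),
          reg2binAltGo, dif_neg (by intro hc; exact h23 hc.2)]
      rw [show PySem.Int.floordiv ((1 <<< ((15:Int)-3-3-3-3).toNat) - 1) 7 = 1 from by decide]
  · have h23 : ¬ beg >>> (23:Nat) = e >>> (23:Nat) := fun hc => h26 (shift_mono beg e 23 3 hc)
    have h20 : ¬ beg >>> (20:Nat) = e >>> (20:Nat) := fun hc => h23 (shift_mono beg e 20 3 hc)
    have h17 : ¬ beg >>> (17:Nat) = e >>> (17:Nat) := fun hc => h20 (shift_mono beg e 17 3 hc)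
    have h14 : ¬ beg >>> (14:Nat) = e >>> (14:Nat) := fun hc => h17 (shift_mono beg e 14 3 hc)
    rw [if_neg h14, if_neg h17, if_neg h20, if_neg h23, if_neg h26, if_pos h26]
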